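-- pv_equiv track=rewrite | github.com/qeedquan/challenges | codegolf/golf-the-inverse-of-exponential-generating-function.py | inverse
-- ===== SOURCE A (Python) =====
-- def inverse(L):
--     n = len(L)
--     E = [1] + [0]*(n + 1)
--     F = []
--     I = []
--
--     f = 1
--     for i in range(1, n+1):
--         F.append(f)
--         f *= i
--
--     for i in range(n):
--         c = E[i] // L[0]
--         I.append(c)
--         for j in range(n - i):
--             E[i + j] -= (c * L[j] * F[i + j]) // F[j] // F[i]
--     return I
-- ===== SOURCE B (Python) =====
-- def inverse(L):
--     n = len(L)
--     if n == 0: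
--         return []
--     row = [1]  # row of Pascal's triangle: row[i] == C(m, i)
--     I = []
--     for m in range(n):
--         s = 1 if m == 0 else 0
--         for i in range(m):
--             s -= row[i] * I[i] * L[m - i]
--         I.append(s // L[0])
--         row = [1] + [row[i - 1] + row[i] for i in range(1, len(row))] + [1]
--     return I
-- ===== Notes on version B (the rewrite author's own statement) =====
-- stated objective: alternative
-- what changed: Replaces A's forward scatter into a mutated E accumulator (with a factorial table and two floor divisions per term) by a backward gather: a single Pascal-triangle row is maintained additively and each coefficient is computed directly from the previously computed ones; no factorial table, no E array, no divisions except the final // L[0].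
-- outside the precondition, e.g. on inverse([0]): A raises ZeroDivisionError, B raises ZeroDivisionError
import Mathlib
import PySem

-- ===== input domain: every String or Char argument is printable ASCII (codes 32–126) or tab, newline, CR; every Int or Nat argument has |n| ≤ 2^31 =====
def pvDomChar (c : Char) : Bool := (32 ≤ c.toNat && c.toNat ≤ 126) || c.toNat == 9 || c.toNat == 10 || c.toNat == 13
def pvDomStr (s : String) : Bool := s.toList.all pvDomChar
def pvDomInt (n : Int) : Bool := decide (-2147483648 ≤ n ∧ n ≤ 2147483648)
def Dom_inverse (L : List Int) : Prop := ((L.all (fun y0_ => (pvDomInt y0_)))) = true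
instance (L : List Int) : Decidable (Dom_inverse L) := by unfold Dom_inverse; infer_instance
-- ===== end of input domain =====

-- B computes each coefficient by a backward gather over an additively built Pascal triangle,
-- instead of A's forward scatter into a mutated E array via factorial-ratio divisions (objective: alternative).

-- ===== PORT A =====
def inverse (L : List Int) : List Int :=
  let n : Int := PySem.List.len L
  let E : List Int := 1 :: List.replicate (n + 1).toNat 0
  let fF := (PySem.List.pyRange 1 (n + 1) 1).foldl
      (fun (s : List Int × Int) i => (s.1 ++ [s.2], s.2 * i)) ([], 1)
  let F := fF.1
  let r := (PySem.List.pyRange 0 n 1).foldl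
      (fun (s : List Int × List Int) i =>
        let c := PySem.Int.floordiv (PySem.List.pyGetD s.1 i 0) (PySem.List.pyGetD L 0 0)
        let E' := (PySem.List.pyRange 0 (n - i) 1).foldl
            (fun (E : List Int) j =>
              PySem.List.pySetD E (i + j)
                (PySem.List.pyGetD E (i + j) 0 -
                  PySem.Int.floordiv
                    (PySem.Int.floordiv
                      (c * PySem.List.pyGetD L j 0 * PySem.List.pyGetD F (i + j) 0)
                      (PySem.List.pyGetD F j 0))
                    (PySem.List.pyGetD F i 0)))
            s.1
        (E', s.2 ++ [c]))
      (E, ([] : List Int))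
  r.2

-- ===== PORT B =====
def pascalNext (row : List Int) : List Int :=
  1 :: (((PySem.List.pyRange 1 (PySem.List.len row) 1).map
        (fun i => PySem.List.pyGetD row (i - 1) 0 + PySem.List.pyGetD row i 0)) ++ [1])

def inverse_alt (L : List Int) : List Int :=
  let n := L.length
  if n = 0 then []
  else
    ((List.range n).foldl
      (fun (s : List Int × List Int) m =>
        let s0 : Int := if m = 0 then 1 else 0
        let t := (List.range m).foldl
            (fun t i => t - s.1.getD i 0 * s.2.getD i 0 * L.getD (m - i) 0) s0
        (pascalNext s.1, s.2 ++ [PySem.Int.floordiv t (L.getD 0 0)]))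
      ([(1 : Int)], ([] : List Int))).2

-- ===== PRECONDITION & SPEC =====
-- Pre_ excludes exactly the inputs on which the Python A raises ZeroDivisionError: a nonempty L with L[0] == 0.
def Pre_inverse (L : List Int) : Prop := L = [] ∨ L.getD 0 0 ≠ 0
instance (L : List Int) : Decidable (Pre_inverse L) := by unfold Pre_inverse; infer_instance
def pvWitness_inverse : List Int := [1, 2, 3]

def Spec_inverse (L : List Int) (out : List Int) : Prop := out = inverse_alt L
instance (L : List Int) (out : List Int) : Decidable (Spec_inverse L out) := by unfold Spec_inverse; infer_instance

-- ===== CLAIM (what is proved, stated in full; the proofs are below) =====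
def Claim_equal_inverse : Prop := ∀ (L : List Int), Dom_inverse L → Pre_inverse L → Spec_inverse L (inverse L)

-- ===== LEMMAS AND PROOFS =====

-- Reference sequence: the first m inverse coefficients, defined by the gather recurrence.
def pvCoefStep (L : List Int) (m : ℕ) (p : List Int) : Int :=
  Int.fdiv ((if m = 0 then (1 : Int) else 0) -
      ((List.range m).map (fun i => ((m.choose i : ℕ) : Int) * p.getD i 0 * L.getD (m - i) 0)).sum)
    (L.getD 0 0)

def pvCoefs (L : List Int) : ℕ → List Int
  | 0 => []
  | m + 1 => pvCoefs L m ++ [pvCoefStep L m (pvCoefs L m)]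

def pvCoef (L : List Int) (m : ℕ) : Int := pvCoefStep L m (pvCoefs L m)

def pvRow (m : ℕ) : List Int := (List.range (m + 1)).map (fun i => ((m.choose i : ℕ) : Int))

def pvFacts (n : ℕ) : List Int := (List.range n).map (fun i => ((i.factorial : ℕ) : Int))

-- Value of A's accumulator E at slot k after m outer iterations (for m ≤ k < n).
def pvE (L : List Int) (m k : ℕ) : Int :=
  (if k = 0 then (1 : Int) else 0) -
    ((List.range m).map (fun t => ((k.choose t : ℕ) : Int) * pvCoef L t * L.getD (k - t) 0)).sum

lemma pvCoefs_length (L : List Int) (m : ℕ) : (pvCoefs L m).length = m := by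
  induction m with
  | zero => rfl
  | succ m ih => simp [pvCoefs, ih]

lemma pvCoefs_getD (L : List Int) {i m : ℕ} (h : i < m) :
    (pvCoefs L m).getD i 0 = pvCoef L i := by
  induction m with
  | zero => omega
  | succ m ih =>
    rcases Nat.lt_succ_iff_lt_or_eq.mp h with h' | h'
    · rw [pvCoefs, List.getD_append _ _ _ _ (by rw [pvCoefs_length]; omega)]
      exact ih h'
    · subst h'
      rw [pvCoefs, List.getD_eq_getElem?_getD]
      rw [List.getElem?_append_right (by rw [pvCoefs_length])]
      simp [pvCoefs_length, pvCoef]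

lemma pvCoef_eq (L : List Int) (m : ℕ) :
    pvCoef L m = Int.fdiv (pvE L m m) (L.getD 0 0) := by
  unfold pvCoef pvCoefStep pvE
  congr 3
  refine List.map_congr_left (fun i hi => ?_)
  rw [pvCoefs_getD L (List.mem_range.mp hi)]

-- exact division through factorials: (a * (i+j)!) // j! // i! = a * C(i+j, i)
lemma pv_exact_div (a : Int) (i j : ℕ) :
    PySem.Int.floordiv (PySem.Int.floordiv (a * (((i + j).factorial : ℕ) : Int)) ((j.factorial : ℕ) : Int))
      ((i.factorial : ℕ) : Int) = a * (((i + j).choose i : ℕ) : Int) := by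
  simp only [PySem.Int.floordiv]
  have key : ((i + j).factorial : Int) = ((i + j).choose i : Int) * (i.factorial : Int) * (j.factorial : Int) := by
    have := Nat.add_choose_mul_factorial_mul_factorial j i
    rw [Nat.add_comm j i] at this
    exact_mod_cast (by rw [← this]; ring_nf : ((i + j).factorial : ℕ) = (i + j).choose i * i.factorial * j.factorial)
  rw [key]
  have hj : ((j.factorial : ℕ) : Int) ≠ 0 := by exact_mod_cast j.factorial_ne_zero
  have hi : ((i.factorial : ℕ) : Int) ≠ 0 := by exact_mod_cast i.factorial_ne_zero
  rw [show a * ((((i + j).choose i : ℕ) : Int) * (i.factorial : Int) * (j.factorial : Int))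
      = (a * ((i + j).choose i : Int) * (i.factorial : Int)) * (j.factorial : Int) by ring,
    Int.mul_fdiv_cancel _ hj, Int.mul_fdiv_cancel _ hi]

lemma pv_facts_fold (n : ℕ) :
    (PySem.List.pyRange 1 ((n : Int) + 1) 1).foldl
      (fun (s : List Int × Int) i => (s.1 ++ [s.2], s.2 * i)) ([], 1)
    = (pvFacts n, ((n.factorial : ℕ) : Int)) := by
  induction n with
  | zero => simp [PySem.List.pyRange_one_eq_nil, pvFacts]
  | succ n ih =>
    have h : ((n + 1 : ℕ) : Int) + 1 = ((n : Int) + 1) + 1 := by push_cast; ring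
    rw [h, PySem.List.pyRange_one_succ_right (by omega), List.foldl_append, ih]
    simp only [List.foldl_cons, List.foldl_nil]
    refine Prod.ext ?_ ?_
    · simp [pvFacts, List.range_succ]
    · show ((n.factorial : ℕ) : Int) * ((n : Int) + 1) = _
      push_cast [Nat.factorial_succ]; ring

lemma pvE_succ (L : List Int) (m k : ℕ) :
    pvE L (m + 1) k = pvE L m k - ((k.choose m : ℕ) : Int) * pvCoef L m * L.getD (k - m) 0 := by
  simp [pvE, List.range_succ]
  ring

lemma pv_pascalNext (m : ℕ) : pascalNext (pvRow m) = pvRow (m + 1) := by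
  have hlen : PySem.List.len (pvRow m) = ((m : Int) + 1) := by
    simp [pvRow]
  have hmap : (PySem.List.pyRange 1 (PySem.List.len (pvRow m)) 1).map
        (fun i => PySem.List.pyGetD (pvRow m) (i - 1) 0 + PySem.List.pyGetD (pvRow m) i 0)
      = (List.range m).map (fun k => (((m + 1).choose (k + 1) : ℕ) : Int)) := by
    rw [hlen, PySem.List.pyRange_one]
    have : ((m : Int) + 1 - 1).toNat = m := by omega
    rw [this, List.map_map]
    refine List.map_congr_left (fun k hk => ?_)
    have hk' : k < m := List.mem_range.mp hk
    have e2 : (1 + (k : Int)) = (((k + 1 : ℕ)) : Int) := by push_cast; ring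
    have e1 : (((k + 1 : ℕ)) : Int) - 1 = ((k : ℕ) : Int) := by push_cast; ring
    simp only [Function.comp_apply, e2, e1, PySem.List.pyGetD_natCast]
    rw [pvRow, PySem.List.getD_map_range _ _ _ _ (by omega), PySem.List.getD_map_range _ _ _ _ (by omega)]
    push_cast [Nat.choose_succ_succ]
    ring
  rw [pascalNext, hmap]
  have : pvRow (m + 1) = 1 :: ((List.range (m + 1)).map (fun i => (((m + 1).choose (i + 1) : ℕ) : Int))) := by
    rw [pvRow, List.range_succ_eq_map, List.map_cons, List.map_map]
    simp [Function.comp]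
  rw [this, List.range_succ, List.map_append]
  simp

lemma pv_alt_fold (L : List Int) (m : ℕ) :
    (List.range m).foldl
      (fun (s : List Int × List Int) k =>
        (pascalNext s.1,
         s.2 ++ [PySem.Int.floordiv
          ((List.range k).foldl
            (fun t i => t - s.1.getD i 0 * s.2.getD i 0 * L.getD (k - i) 0)
            (if k = 0 then 1 else 0))
          (L.getD 0 0)]))
      ([(1 : Int)], ([] : List Int)) = (pvRow m, pvCoefs L m) := by
  induction m with
  | zero =>
    refine Prod.ext ?_ rfl
    simp [pvRow]
  | succ m ih =>
    rw [List.range_succ, List.foldl_append, ih]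
    simp only [List.foldl_cons, List.foldl_nil]
    refine Prod.ext (pv_pascalNext m) ?_
    have hs : (List.range m).foldl
        (fun t i => t - (pvRow m).getD i 0 * (pvCoefs L m).getD i 0 * L.getD (m - i) 0)
        (if m = 0 then (1 : Int) else 0)
        = (if m = 0 then (1 : Int) else 0) -
          ((List.range m).map (fun i => ((m.choose i : ℕ) : Int) * (pvCoefs L m).getD i 0 * L.getD (m - i) 0)).sum := by
      simp only [sub_eq_add_neg]
      rw [PySem.List.foldl_add (g := fun i => -((pvRow m).getD i 0 * (pvCoefs L m).getD i 0 * L.getD (m - i) 0))]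
      have hmapeq : (List.range m).map
          (fun i => -((pvRow m).getD i 0 * (pvCoefs L m).getD i 0 * L.getD (m - i) 0))
          = ((List.range m).map (fun i => ((m.choose i : ℕ) : Int) * (pvCoefs L m).getD i 0 * L.getD (m - i) 0)).map Neg.neg := by
        rw [List.map_map]
        refine List.map_congr_left (fun i hi => ?_)
        have hi' : i < m := List.mem_range.mp hi
        rw [pvRow, PySem.List.getD_map_range _ _ _ _ (by omega)]
        rfl
      rw [hmapeq, ← List.sum_neg]
    show pvCoefs L m ++ _ = _
    rw [hs]
    rw [pvCoefs]
    congr 1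

theorem alt_eq_coefs (L : List Int) : inverse_alt L = pvCoefs L L.length := by
  by_cases h : L.length = 0
  · simp [inverse_alt, h, pvCoefs]
  · unfold inverse_alt
    simp only [if_neg h, pv_alt_fold]

-- A-side: one inner-loop step function (the port's inner lambda, named for the proofs)
def pvStepA (L F : List Int) (c i : Int) (E : List Int) (j : Int) : List Int :=
  PySem.List.pySetD E (i + j)
    (PySem.List.pyGetD E (i + j) 0 -
      PySem.Int.floordiv
        (PySem.Int.floordiv
          (c * PySem.List.pyGetD L j 0 * PySem.List.pyGetD F (i + j) 0)
          (PySem.List.pyGetD F j 0))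
        (PySem.List.pyGetD F i 0))

def pvUpd (L F : List Int) (c : Int) (m k : ℕ) : Int :=
  PySem.Int.floordiv
    (PySem.Int.floordiv
      (c * PySem.List.pyGetD L ((k - m : ℕ) : Int) 0 * PySem.List.pyGetD F ((k : ℕ) : Int) 0)
      (PySem.List.pyGetD F ((k - m : ℕ) : Int) 0))
    (PySem.List.pyGetD F ((m : ℕ) : Int) 0)

lemma pv_inner (L F : List Int) (c : Int) (m : ℕ) :
    ∀ (r : ℕ) (E : List Int), m + r ≤ E.length →
      (((List.range r).map (fun (k : ℕ) => (k : Int))).foldl (pvStepA L F c (m : Int)) E).length = E.length ∧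
      ∀ k : ℕ, (((List.range r).map (fun (k : ℕ) => (k : Int))).foldl (pvStepA L F c (m : Int)) E).getD k 0 =
        if m ≤ k ∧ k < m + r then E.getD k 0 - pvUpd L F c m k else E.getD k 0 := by
  intro r
  induction r with
  | zero =>
    intro E _
    refine ⟨rfl, fun k => ?_⟩
    simp
  | succ r ih =>
    intro E hE
    obtain ⟨ihlen, ihget⟩ := ih E (by omega)
    rw [List.range_succ, List.map_append, List.foldl_append]
    simp only [List.map_cons, List.map_nil]
    set R := ((List.range r).map (fun (k : ℕ) => (k : Int))).foldl (pvStepA L F c (m : Int)) E with hRdef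
    have hlt : m + r < R.length := by omega
    have hidx : (m : Int) + (r : Int) = ((m + r : ℕ) : Int) := by push_cast; ring
    have hread : PySem.List.pyGetD R ((m : Int) + (r : Int)) 0 = E.getD (m + r) 0 := by
      rw [hidx, PySem.List.pyGetD_natCast, ihget]
      simp
    have hstep : (List.foldl (pvStepA L F c (m : Int)) R [((r : ℕ) : Int)]) =
        R.set (m + r) (E.getD (m + r) 0 - pvUpd L F c m (m + r)) := by
      simp only [List.foldl_cons, List.foldl_nil, pvStepA, hread]
      rw [hidx, PySem.List.pySetD_natCast]
      congr 2
      unfold pvUpd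
      rw [Nat.add_sub_cancel_left]
    rw [hstep]
    constructor
    · rw [List.length_set]; omega
    · intro k
      rw [List.getD_eq_getElem?_getD, List.getElem?_set]
      by_cases hk : k = m + r
      · subst hk
        rw [if_pos rfl, if_pos (by omega)]
        simp
      · rw [if_neg (fun h => hk h.symm)]
        rw [← List.getD_eq_getElem?_getD, ihget]
        by_cases h1 : m ≤ k ∧ k < m + r
        · rw [if_pos h1, if_pos ⟨h1.1, by omega⟩]
        · rw [if_neg h1, if_neg (by omega)]

lemma pv_facts_getD {i n : ℕ} (h : i < n) :
    PySem.List.pyGetD (pvFacts n) ((i : ℕ) : Int) 0 = ((i.factorial : ℕ) : Int) := by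
  rw [PySem.List.pyGetD_natCast, pvFacts, PySem.List.getD_map_range _ _ _ _ h]

-- A-side: one outer-loop step function (the port's outer lambda, named for the proofs)
def pvOuterStep (L F : List Int) (n : Int) (s : List Int × List Int) (i : Int) : List Int × List Int :=
  let c := PySem.Int.floordiv (PySem.List.pyGetD s.1 i 0) (PySem.List.pyGetD L 0 0)
  ((PySem.List.pyRange 0 (n - i) 1).foldl (pvStepA L F c i) s.1, s.2 ++ [c])

lemma pv_upd_eq (L : List Int) {m k : ℕ} (hmk : m ≤ k) (hk : k < L.length) (c : Int) :
    pvUpd L (pvFacts L.length) c m k = ((k.choose m : ℕ) : Int) * c * L.getD (k - m) 0 := by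
  unfold pvUpd
  rw [PySem.List.pyGetD_natCast L, pv_facts_getD hk, pv_facts_getD (show k - m < L.length by omega),
    pv_facts_getD (show m < L.length by omega)]
  obtain ⟨j, rfl⟩ : ∃ j, k = m + j := ⟨k - m, by omega⟩
  simp only [Nat.add_sub_cancel_left]
  rw [pv_exact_div (c * L.getD j 0) m j]
  ring

lemma pv_outer (L : List Int) : ∀ (m : ℕ), m ≤ L.length →
    (((List.range m).map (fun (k : ℕ) => (k : Int))).foldl
        (pvOuterStep L (pvFacts L.length) ((L.length : ℕ) : Int))
        (1 :: List.replicate (L.length + 1) 0, ([] : List Int))).2 = pvCoefs L m ∧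
    (((List.range m).map (fun (k : ℕ) => (k : Int))).foldl
        (pvOuterStep L (pvFacts L.length) ((L.length : ℕ) : Int))
        (1 :: List.replicate (L.length + 1) 0, ([] : List Int))).1.length = L.length + 2 ∧
    ∀ k : ℕ, m ≤ k → k < L.length →
      (((List.range m).map (fun (k : ℕ) => (k : Int))).foldl
        (pvOuterStep L (pvFacts L.length) ((L.length : ℕ) : Int))
        (1 :: List.replicate (L.length + 1) 0, ([] : List Int))).1.getD k 0 = pvE L m k := by
  intro m
  induction m with
  | zero =>
    intro _
    refine ⟨rfl, by simp, fun k _ _ => ?_⟩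
    unfold pvE
    cases k with
    | zero => simp
    | succ k => simp
  | succ m ih =>
    intro hm
    obtain ⟨ihI, ihlen, ihget⟩ := ih (by omega)
    rw [List.range_succ, List.map_append, List.foldl_append]
    simp only [List.map_cons, List.map_nil, List.foldl_cons, List.foldl_nil]
    set S := ((List.range m).map (fun (k : ℕ) => (k : Int))).foldl
        (pvOuterStep L (pvFacts L.length) ((L.length : ℕ) : Int))
        (1 :: List.replicate (L.length + 1) 0, ([] : List Int)) with hS
    have hc : PySem.Int.floordiv (PySem.List.pyGetD S.1 ((m : ℕ) : Int) 0) (PySem.List.pyGetD L 0 0)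
        = pvCoef L m := by
      rw [PySem.List.pyGetD_natCast, ihget m le_rfl (by omega), PySem.List.pyGetD_zero]
      exact (pvCoef_eq L m).symm
    have hrange : PySem.List.pyRange 0 (((L.length : ℕ) : Int) - ((m : ℕ) : Int)) 1
        = (List.range (L.length - m)).map (fun (k : ℕ) => (k : Int)) := by
      have : ((L.length : ℕ) : Int) - ((m : ℕ) : Int) = (((L.length - m : ℕ)) : Int) := by
        omega
      rw [this, PySem.List.pyRange_zero_natCast]
    obtain ⟨innerlen, innerget⟩ := pv_inner L (pvFacts L.length) (pvCoef L m) m (L.length - m) S.1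
      (by rw [ihlen]; omega)
    unfold pvOuterStep
    simp only [hc, hrange]
    refine ⟨by rw [ihI]; rfl, by rw [innerlen, ihlen], fun k hk1 hk2 => ?_⟩
    rw [innerget k, if_pos ⟨by omega, by omega⟩, ihget k (by omega) hk2,
      pv_upd_eq L (by omega) hk2, pvE_succ]

theorem inverse_eq_coefs (L : List Int) : inverse L = pvCoefs L L.length := by
  have ht : (((L.length : ℕ) : Int) + 1).toNat = L.length + 1 := by omega
  have h := (pv_outer L L.length le_rfl).1
  rw [← h]
  simp only [inverse, PySem.List.len_eq, ht, pv_facts_fold L.length, PySem.List.pyRange_zero_natCast]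
  rfl

-- ===== VERDICT (by name: the statement is the Claim_ definition above) =====
theorem inverse_spec : Claim_equal_inverse := by
  intro L _ _
  unfold Spec_inverse
  rw [inverse_eq_coefs, alt_eq_coefs]
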